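-- pv_equiv track=rewrite | github.com/WolfManR/PythonLessons | Lesson5/division_master.py | biggest_divider
-- ===== SOURCE A (Python) =====
-- def is_simple(number):
--     count = 0
--     for i in range(1, number):
--         count = count if number % i > 0 else count + 1
--         if count > 2:
--             return False
--     return True if count == 2 else False
--
-- def biggest_divider(number):
--     if is_simple(number):
--         return number
--
--     max_simple_number = 0
--     for i in range(1, number):
--         if not number % i > 0:
--             continue
--         if is_simple(i):
--             max_simple_number = i
--     return max_simple_number
-- ===== SOURCE B (Python) =====
-- def _is_prime(p):
--     if p < 2:
--         return False
--     d = 2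
--     while d * d <= p:
--         if p % d == 0:
--             return False
--         d += 1
--     return True
--
--
-- def biggest_divider(number):
--     best = 0
--     p = 2
--     while p * p < number:
--         if _is_prime(p) and number % (p * p) != 0:
--             best = p * p
--         p += 1
--     if p * p == number and _is_prime(p):
--         return number
--     return best
-- ===== Notes on version B (the rewrite author's own statement) =====
-- stated objective: faster
-- what changed: A scans every i < n and counts all divisors of each candidate (quadratic nested loops); B iterates only over the square roots p with p*p < n, keeps the last prime square p*p not dividing n, and tests primality by trial division up to sqrt(p).
import Mathlib
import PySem

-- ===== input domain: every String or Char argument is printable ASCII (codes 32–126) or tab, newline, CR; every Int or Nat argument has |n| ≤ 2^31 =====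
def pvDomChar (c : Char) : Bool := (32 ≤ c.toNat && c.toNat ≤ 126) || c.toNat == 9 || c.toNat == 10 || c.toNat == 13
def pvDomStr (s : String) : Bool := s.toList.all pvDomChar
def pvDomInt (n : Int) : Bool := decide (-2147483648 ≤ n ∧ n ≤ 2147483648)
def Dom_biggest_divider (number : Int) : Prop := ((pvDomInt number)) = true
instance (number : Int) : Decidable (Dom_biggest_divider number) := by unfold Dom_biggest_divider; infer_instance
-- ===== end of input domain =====

-- B replaces A's quadratic scan of all i < n (each tested by counting its divisors) with a single
-- pass over the square roots p with p*p < n, testing p for primality by trial division.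

-- ===== PORT A =====
-- is_simple's loop, with its early `return False` once count > 2
def simpleGo (number : Int) (count : Int) : List Int → Bool
  | [] => count == 2
  | i :: rest =>
    let c := if PySem.Int.mod number i > 0 then count else count + 1
    if c > 2 then false else simpleGo number c rest

def is_simple (number : Int) : Bool :=
  simpleGo number 0 (PySem.List.pyRange 1 number 1)

def biggest_divider (number : Int) : Int :=
  if is_simple number then number
  else
    (PySem.List.pyRange 1 number 1).foldl
      (fun m i =>
        if ¬ PySem.Int.mod number i > 0 then m
        else if is_simple i then i else m) 0

-- ===== PORT B =====
-- _is_prime's trial-division loop: d = 2, 3, … while d*d ≤ p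
-- termination helper for the two while-loops below (cited in their decreasing_by)
lemma pvSubToNatLt (c x : Int) (h : x < c) : (c - (x + 1)).toNat < (c - x).toNat :=
  (Int.toNat_lt_toNat (sub_pos.mpr h)).mpr (sub_lt_sub_left (lt_add_one x) c)

def primeGo (p : Int) (d : Int) : Bool :=
  if _h : d * d ≤ p then
    if PySem.Int.mod p d == 0 then false else primeGo p (d + 1)
  else true
termination_by (p + 2 - d).toNat
decreasing_by
  exact pvSubToNatLt (p + 2) d
    ((le_or_gt d 0).elim
      (fun h1 => lt_of_le_of_lt (le_trans h1 (le_trans (mul_self_nonneg d) _h))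
        (lt_add_of_pos_right p two_pos))
      (fun h1 => lt_of_le_of_lt (le_trans (le_mul_of_one_le_right h1.le h1) _h)
        (lt_add_of_pos_right p two_pos)))

def pv_is_prime (p : Int) : Bool :=
  if p < 2 then false else primeGo p 2

-- the main `while p * p < number` loop of B
def bdLoop (number : Int) (p best : Int) : Int :=
  if _h : p * p < number then
    bdLoop number (p + 1)
      (if pv_is_prime p && !(PySem.Int.mod number (p * p) == 0) then p * p else best)
  else if p * p == number && pv_is_prime p then number else best
termination_by (number - p).toNat
decreasing_by
  exact pvSubToNatLt number p
    ((le_or_gt p 0).elim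
      (fun h1 => lt_of_le_of_lt (le_trans h1 (mul_self_nonneg p)) _h)
      (fun h1 => lt_of_le_of_lt (le_mul_of_one_le_right h1.le h1) _h))

def biggest_divider_alt (number : Int) : Int := bdLoop number 2 0

-- ===== PRECONDITION & SPEC =====
def Spec_biggest_divider (number : Int) (out : Int) : Prop := out = biggest_divider_alt number
instance (number : Int) (out : Int) : Decidable (Spec_biggest_divider number out) := by unfold Spec_biggest_divider; infer_instance

-- ===== CLAIM (what is proved, stated in full; the proofs are below) =====
def Claim_equal_biggest_divider : Prop := ∀ (number : Int), Dom_biggest_divider number → Spec_biggest_divider number (biggest_divider number)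

-- ===== LEMMAS AND PROOFS =====

-- `i` is the square of a prime
def IsPSq (i : Int) : Prop := ∃ p : ℕ, p.Prime ∧ i = (p : ℤ) * p

-- the exit value of B's loop: the least q ≥ 2 with n ≤ q*q
def tQ (n : Int) : Int := max 2 ((Nat.sqrt (n - 1).toNat : ℤ) + 1)

-- the Bool filters corresponding to A's and B's loop bodies
def cA (n : Int) (i : Int) : Bool := decide (0 < PySem.Int.mod n i) && is_simple i
def cB (n : Int) (q : Int) : Bool := pv_is_prime q && !(PySem.Int.mod n (q * q) == 0)

lemma tQ_two_le (n : Int) : 2 ≤ tQ n := le_max_left _ _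

lemma tQ_le_sq (n : Int) : n ≤ tQ n * tQ n := by
  unfold tQ
  rcases le_or_gt n 1 with h | h
  · have h2 : (2 : ℤ) ≤ max 2 ((Nat.sqrt (n - 1).toNat : ℤ) + 1) := le_max_left _ _
    nlinarith
  · set s := Nat.sqrt (n - 1).toNat with hs
    have h1 : ((n - 1).toNat : ℤ) = n - 1 := by omega
    have hlt : (n - 1).toNat < (s + 1) * (s + 1) := by
      have h' := Nat.lt_succ_sqrt' (n - 1).toNat
      rw [pow_two] at h'
      exact h'
    have hcast : n - 1 < ((s : ℤ) + 1) * ((s : ℤ) + 1) := by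
      rw [← h1]; exact_mod_cast hlt
    have hle : ((s : ℤ) + 1) ≤ max 2 ((s : ℤ) + 1) := le_max_right _ _
    have h0 : (0 : ℤ) ≤ (s : ℤ) + 1 := by positivity
    nlinarith

lemma tQ_sq_lt (n : Int) {p : Int} (h2 : 2 ≤ p) (hlt : p < tQ n) : p * p < n := by
  unfold tQ at hlt
  set s := Nat.sqrt (n - 1).toNat with hs
  have hp : p < (s : ℤ) + 1 := by
    rcases le_or_gt ((s : ℤ) + 1) 2 with h | h
    · rw [max_eq_left h] at hlt; omega
    · rw [max_eq_right (le_of_lt h)] at hlt; exact hlt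
  have hps : p.toNat ≤ s := by omega
  have hsq : s * s ≤ (n - 1).toNat := by
    have := Nat.sqrt_le' (n - 1).toNat
    rw [pow_two] at this
    exact this
  have hnat : p.toNat * p.toNat ≤ (n - 1).toNat :=
    le_trans (Nat.mul_le_mul hps hps) hsq
  have hcast : (p.toNat : ℤ) * (p.toNat : ℤ) ≤ ((n - 1).toNat : ℤ) := by exact_mod_cast hnat
  have hpp : (p.toNat : ℤ) = p := by omega
  rw [hpp] at hcast
  rcases le_or_gt 1 n with hn | hn
  · have : ((n - 1).toNat : ℤ) = n - 1 := by omega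
    omega
  · have : ((n - 1).toNat : ℤ) = 0 := by omega
    nlinarith

lemma tQ_ge_sq {n q : Int} (hq : tQ n ≤ q) : n ≤ q * q := by
  have h2 := tQ_two_le n
  nlinarith [tQ_le_sq n]

-- characterization of A's divisor-counting loop
lemma simpleGo_iff (n : Int) : ∀ (l : List Int) (c : Int), 0 ≤ c → c ≤ 2 →
    (simpleGo n c l = true ↔
      c + (l.countP (fun i => decide (PySem.Int.mod n i ≤ 0)) : ℤ) = 2) := by
  intro l
  induction l with
  | nil =>
    intro c h0 h2
    simp [simpleGo]
  | cons i t ih =>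
    intro c h0 h2
    simp only [simpleGo, List.countP_cons]
    by_cases hd : PySem.Int.mod n i > 0
    · rw [if_pos hd]
      have hnot : (decide (PySem.Int.mod n i ≤ 0)) = false := by
        simp; omega
      rw [if_neg (by omega : ¬ c > 2), ih c h0 h2, hnot]
      simp
    · rw [if_neg hd]
      have hyes : (decide (PySem.Int.mod n i ≤ 0)) = true := by
        simp; omega
      rw [hyes, if_pos rfl]
      by_cases hc : c + 1 > 2
      · rw [if_pos hc]
        have : (t.countP (fun i => decide (PySem.Int.mod n i ≤ 0)) : ℤ) ≥ 0 := by positivity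
        constructor
        · intro h; exact absurd h (by simp)
        · intro h; exfalso; push_cast at h; omega
      · rw [if_neg hc, ih (c + 1) (by omega) (by omega)]
        constructor <;> intro h <;> push_cast at h ⊢ <;> omega

-- the divisor count over [1, m-1] is the number of proper divisors
lemma countP_range_eq_card (m : ℕ) :
    (List.range (m - 1)).countP (fun k => decide ((1 + k) ∣ m)) = m.properDivisors.card := by
  have h1 : m.properDivisors.card = ((List.range' 1 (m - 1)).filter (fun k => decide (k ∣ m))).length := by
    rw [Nat.properDivisors, Nat.Ico_eq_range']
    rfl
  rw [h1, List.range'_eq_map_range, List.filter_map, List.length_map,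
    ← List.countP_eq_length_filter]
  rfl

-- a number with exactly two proper divisors is the square of a prime
lemma card_properDivisors_two (m : ℕ) (hm : 2 ≤ m) :
    m.properDivisors.card = 2 ↔ ∃ p : ℕ, p.Prime ∧ m = p * p := by
  constructor
  · intro h
    by_cases hp : m.Prime
    · exfalso
      have : m.properDivisors = {1} := by
        ext x
        simp only [Nat.mem_properDivisors, Finset.mem_singleton]
        constructor
        · rintro ⟨hdvd, hlt⟩
          rcases (Nat.Prime.eq_one_or_self_of_dvd hp x hdvd) with h1 | h1
          · exact h1
          · omega
        · rintro rfl; exact ⟨one_dvd _, by omega⟩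
      rw [this] at h
      simp at h
    · set p := m.minFac with hpdef
      have hpp : p.Prime := Nat.minFac_prime (by omega)
      have hdvd : p ∣ m := Nat.minFac_dvd m
      have hple : p ≤ m := Nat.le_of_dvd (by omega) hdvd
      have hplt : p < m := by
        rcases lt_or_eq_of_le hple with h' | h'
        · exact h'
        · exact absurd (h' ▸ hpp) hp
      have hdvd' := hdvd
      obtain ⟨q, hmq⟩ := hdvd'
      have hq0 : 0 < q := by
        rcases Nat.eq_zero_or_pos q with h' | h'
        · rw [h'] at hmq; omega
        · exact h'
      have hq1 : q ≠ 1 := by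
        rintro rfl
        rw [mul_one] at hmq
        exact hp (hmq ▸ hpp)
      have hqlt : q < m := by
        have h2 : 2 ≤ p := hpp.two_le
        calc q = 1 * q := (one_mul q).symm
        _ < p * q := (Nat.mul_lt_mul_right hq0).mpr (by omega)
        _ = m := hmq.symm
      by_cases hpq : q = p
      · exact ⟨p, hpp, by rw [hmq, hpq]⟩
      · exfalso
        have hsub : ({1, p, q} : Finset ℕ) ⊆ m.properDivisors := by
          intro x hx
          simp only [Finset.mem_insert, Finset.mem_singleton] at hx
          rcases hx with rfl | rfl | rfl
          · exact Nat.mem_properDivisors.mpr ⟨one_dvd _, by omega⟩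
          · exact Nat.mem_properDivisors.mpr ⟨hdvd, hplt⟩
          · exact Nat.mem_properDivisors.mpr ⟨⟨p, by rw [hmq]; ring⟩, hqlt⟩
        have hcard : ({1, p, q} : Finset ℕ).card = 3 := by
          have h2 : 2 ≤ p := hpp.two_le
          rw [Finset.card_insert_of_notMem (by simp; omega),
            Finset.card_insert_of_notMem (by simp; omega)]
          simp
        have := Finset.card_le_card hsub
        omega
  · rintro ⟨p, hp, rfl⟩
    rw [show p * p = p ^ 2 by ring, Nat.properDivisors_prime_pow hp]
    simp

lemma is_simple_iff (n : Int) : is_simple n = true ↔ IsPSq n := by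
  rcases le_or_gt n 1 with hn | hn
  · rw [is_simple, PySem.List.pyRange_one_eq_nil (by omega)]
    constructor
    · intro h; exact absurd h (by simp [simpleGo])
    · rintro ⟨p, hp, hpn⟩
      exfalso
      have h2 : (2 : ℤ) ≤ (p : ℤ) := by exact_mod_cast hp.two_le
      nlinarith
  · set m := n.toNat with hm
    have hm2 : 2 ≤ m := by omega
    have hnm : (m : ℤ) = n := by omega
    rw [is_simple, simpleGo_iff n _ 0 le_rfl (by norm_num), zero_add]
    have hcnt : (PySem.List.pyRange 1 n 1).countP (fun i => decide (PySem.Int.mod n i ≤ 0)) =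
        (List.range (m - 1)).countP (fun k => decide ((1 + k) ∣ m)) := by
      rw [PySem.List.pyRange_one, List.countP_map]
      have hlen : (n - 1).toNat = m - 1 := by omega
      rw [hlen]
      apply List.countP_congr
      intro k _
      have hpos : (0 : ℤ) < 1 + (k : ℤ) := by positivity
      have hnn := PySem.Int.mod_nonneg n hpos
      simp only [Function.comp_apply, decide_eq_true_eq]
      constructor
      · intro h
        have h0 : PySem.Int.mod n (1 + (k : ℤ)) = 0 := by omega
        have hd : (1 + (k : ℤ)) ∣ n := (PySem.Int.mod_eq_zero_iff_dvd n (1 + (k : ℤ))).mp h0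
        have : ((1 + k : ℕ) : ℤ) ∣ (m : ℤ) := by push_cast; rw [hnm]; exact hd
        exact_mod_cast this
      · intro h
        have hd : ((1 + k : ℕ) : ℤ) ∣ (m : ℤ) := by exact_mod_cast h
        push_cast at hd; rw [hnm] at hd
        have h0 : PySem.Int.mod n (1 + (k : ℤ)) = 0 := (PySem.Int.mod_eq_zero_iff_dvd n (1 + (k : ℤ))).mpr hd
        omega
    rw [hcnt]
    have h2 : ((List.range (m - 1)).countP (fun k => decide ((1 + k) ∣ m)) : ℤ) = 2 ↔
        (List.range (m - 1)).countP (fun k => decide ((1 + k) ∣ m)) = 2 := by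
      exact_mod_cast Iff.rfl
    rw [h2, countP_range_eq_card, card_properDivisors_two m hm2]
    constructor
    · rintro ⟨p, hp, hmp⟩
      exact ⟨p, hp, by rw [← hnm, hmp]; push_cast; ring⟩
    · rintro ⟨p, hp, hpn⟩
      refine ⟨p, hp, ?_⟩
      have : (m : ℤ) = (p : ℤ) * p := by rw [hnm]; exact hpn
      exact_mod_cast this

-- characterization of B's trial-division loop
lemma primeGo_iff (p : Int) : ∀ (k : ℕ) (d : Int), 2 ≤ d → (p + 2 - d).toNat = k →
    (primeGo p d = true ↔ ∀ e : Int, d ≤ e → e * e ≤ p → ¬ (e ∣ p)) := by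
  intro k
  induction k with
  | zero =>
    intro d hd hk
    have hgt : ¬ d * d ≤ p := by
      intro hle
      have : d ≤ p := by nlinarith
      omega
    rw [primeGo, dif_neg hgt]
    simp only [true_iff]
    intro e he hee
    exfalso
    have : d * d ≤ e * e := by nlinarith
    omega
  | succ k ih =>
    intro d hd hk
    by_cases hdd : d * d ≤ p
    · rw [primeGo, dif_pos hdd]
      have hdp : d ≤ p := by nlinarith
      by_cases hmod : PySem.Int.mod p d == 0
      · rw [if_pos hmod]
        have hdvd : d ∣ p := by
          rw [← PySem.Int.mod_eq_zero_iff_dvd]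
          exact beq_iff_eq.mp hmod
        constructor
        · intro h; exact absurd h (by simp)
        · intro h; exact absurd hdvd (h d le_rfl hdd)
      · rw [if_neg hmod]
        have hndvd : ¬ d ∣ p := by
          rw [← PySem.Int.mod_eq_zero_iff_dvd]
          intro h
          exact hmod (beq_iff_eq.mpr h)
        rw [ih (d + 1) (by omega) (by omega)]
        constructor
        · intro h e he hee
          rcases eq_or_lt_of_le he with rfl | hlt
          · exact hndvd
          · exact h e (by omega) hee
        · intro h e he hee
          exact h e (by omega) hee
    · rw [primeGo, dif_neg hdd]
      simp only [true_iff]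
      intro e he hee
      exfalso
      have : d * d ≤ e * e := by nlinarith
      omega

lemma pv_is_prime_iff (p : Int) : pv_is_prime p = true ↔ 2 ≤ p ∧ p.toNat.Prime := by
  unfold pv_is_prime
  rcases lt_or_ge p 2 with h | h
  · rw [if_pos h]
    constructor
    · intro hf; exact absurd hf (by simp)
    · rintro ⟨h2, _⟩; omega
  · rw [if_neg (not_lt.mpr h)]
    set m := p.toNat with hmdef
    have hpm : (m : ℤ) = p := by omega
    rw [primeGo_iff p _ 2 le_rfl rfl]
    constructor
    · intro h'
      refine ⟨h, Nat.prime_def_le_sqrt.mpr ⟨by omega, ?_⟩⟩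
      intro a ha2 hasq hdvd
      apply h' (a : ℤ) (by exact_mod_cast ha2)
      · have : a * a ≤ m := Nat.le_sqrt.mp hasq
        have : ((a * a : ℕ) : ℤ) ≤ (m : ℤ) := by exact_mod_cast this
        push_cast at this
        omega
      · rw [← hpm]
        exact_mod_cast hdvd
    · rintro ⟨h2, hpr⟩ e he hee hdvd
      set a := e.toNat with hadef
      have hea : (a : ℤ) = e := by omega
      have haa : a * a ≤ m := by
        have : ((a : ℤ)) * a ≤ (m : ℤ) := by rw [hea, hpm]; exact hee
        exact_mod_cast this
      have hda : a ∣ m := by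
        have : ((a : ℤ)) ∣ (m : ℤ) := by rw [hea, hpm]; exact hdvd
        exact_mod_cast this
      exact (Nat.prime_def_le_sqrt.mp hpr).2 a (by omega) (Nat.le_sqrt.mpr haa) hda

lemma getLast?_cons_map_getD {α β : Type} (xs : List α) (i : α) (f : α → β) (a : β) :
    (((i :: xs).getLast?).map f).getD a = ((xs.getLast?).map f).getD (f i) := by
  cases xs with
  | nil => simp
  | cons y t =>
    rw [List.getLast?_cons_cons]
    rcases List.getLast?_isSome.mpr (List.cons_ne_nil y t) |> Option.isSome_iff_exists.mp with ⟨x, hx⟩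
    simp [hx]

-- A's fold keeps the last element of the filtered list
lemma foldl_if_getLast (c : Int → Bool) : ∀ (l : List Int) (a : Int),
    l.foldl (fun m i => if c i then i else m) a = ((l.filter c).getLast?).getD a := by
  intro l
  induction l with
  | nil => intro a; simp
  | cons i t ih =>
    intro a
    by_cases h : c i
    · rw [List.foldl_cons, if_pos h, ih, List.filter_cons_of_pos h]
      have := getLast?_cons_map_getD (t.filter c) i id a
      simpa using this.symm
    · rw [List.foldl_cons, if_neg (by simp [h]), ih, List.filter_cons_of_neg (by simp [h])]

-- two strictly sorted lists with the same members are equal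
lemma eq_of_sorted_mem : ∀ (l₁ l₂ : List Int), l₁.Pairwise (· < ·) → l₂.Pairwise (· < ·) →
    (∀ x, x ∈ l₁ ↔ x ∈ l₂) → l₁ = l₂ := by
  intro l₁
  induction l₁ with
  | nil =>
    intro l₂ _ _ h
    cases l₂ with
    | nil => rfl
    | cons y t => exact absurd ((h y).mpr (by simp)) (by simp)
  | cons x t₁ ih =>
    intro l₂ h₁ h₂ h
    cases l₂ with
    | nil => exact absurd ((h x).mp (by simp)) (by simp)
    | cons y t₂ =>
      have hx1 : ∀ z ∈ t₁, x < z := (List.pairwise_cons.mp h₁).1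
      have hy2 : ∀ z ∈ t₂, y < z := (List.pairwise_cons.mp h₂).1
      have hxy : x = y := by
        rcases List.mem_cons.mp ((h x).mp (by simp)) with h' | h'
        · exact h'
        · rcases List.mem_cons.mp ((h y).mpr (by simp)) with h'' | h''
          · omega
          · have hlt1 := hy2 x h'
            have hlt2 := hx1 y h''
            omega
      subst hxy
      have ht : ∀ z, z ∈ t₁ ↔ z ∈ t₂ := by
        intro z
        constructor
        · intro hz
          rcases List.mem_cons.mp ((h z).mp (List.mem_cons_of_mem _ hz)) with h' | h'
          · have := hx1 z hz; omega
          · exact h'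
        · intro hz
          rcases List.mem_cons.mp ((h z).mpr (List.mem_cons_of_mem _ hz)) with h' | h'
          · have := hy2 z hz; omega
          · exact h'
      rw [ih t₂ (List.pairwise_cons.mp h₁).2 (List.pairwise_cons.mp h₂).2 ht]

-- A's loop result, when number is not a prime square
lemma biggest_divider_eq (n : Int) (hn : is_simple n = false) :
    biggest_divider n = (((PySem.List.pyRange 1 n 1).filter (cA n)).getLast?).getD 0 := by
  unfold biggest_divider
  rw [if_neg (by simp [hn])]
  have hfun : (fun (m i : Int) =>
      if ¬ PySem.Int.mod n i > 0 then m else if is_simple i then i else m)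
      = fun (m i : Int) => if cA n i then i else m := by
    funext m i
    by_cases h1 : PySem.Int.mod n i > 0 <;> by_cases h2 : is_simple i <;>
      simp [cA, h1, h2]
  rw [hfun, foldl_if_getLast]

-- B's loop result, when number is not a prime square
lemma bdLoop_eq (n : Int) (hn : ¬ IsPSq n) : ∀ (k : ℕ) (p best : Int), 2 ≤ p → p ≤ tQ n →
    (tQ n - p).toNat = k →
    bdLoop n p best =
      ((((PySem.List.pyRange p (tQ n) 1).filter (cB n)).getLast?).map (fun q => q * q)).getD best := by
  intro k
  induction k with
  | zero =>
    intro p best h2 hle hk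
    have hpt : p = tQ n := by omega
    have hng : ¬ p * p < n := not_lt.mpr (tQ_ge_sq (le_of_eq hpt.symm))
    rw [bdLoop, dif_neg hng, hpt, PySem.List.pyRange_one_eq_nil le_rfl]
    by_cases hc : ((p * p == n) && pv_is_prime p) = true
    · exfalso
      rw [Bool.and_eq_true] at hc
      obtain ⟨hb, hpv⟩ := hc
      rcases (pv_is_prime_iff p).mp hpv with ⟨hp2, hppr⟩
      apply hn
      refine ⟨p.toNat, hppr, ?_⟩
      have : p * p = n := beq_iff_eq.mp hb
      rw [← this]
      have : ((p.toNat : ℤ)) = p := by omega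
      rw [this]
    · rw [hpt] at hc
      rw [if_neg hc]
      simp
  | succ k ih =>
    intro p best h2 hle hk
    have hlt : p < tQ n := by omega
    have hg : p * p < n := tQ_sq_lt n h2 hlt
    rw [bdLoop, dif_pos hg, ih (p + 1) _ (by omega) (by omega) (by omega),
      PySem.List.pyRange_one_cons hlt]
    by_cases hcb : cB n p = true
    · rw [List.filter_cons_of_pos hcb]
      rw [show (if pv_is_prime p && !(PySem.Int.mod n (p * p) == 0) then p * p else best) = p * p by
        rw [if_pos]; exact hcb]
      exact (getLast?_cons_map_getD _ p (fun q => q * q) best).symm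
    · rw [List.filter_cons_of_neg (by simp_all)]
      rw [show (if pv_is_prime p && !(PySem.Int.mod n (p * p) == 0) then p * p else best) = best by
        rw [if_neg]; simp_all [cB]]

-- B's loop returns n itself when n = q*q for a prime q
lemma bdLoop_ps (n : Int) (q : ℕ) (hq : q.Prime) (hn : n = (q : ℤ) * q) :
    ∀ (k : ℕ) (p best : Int), 2 ≤ p → p ≤ (q : ℤ) → ((q : ℤ) - p).toNat = k →
    bdLoop n p best = n := by
  intro k
  induction k with
  | zero =>
    intro p best h2 hle hk
    have hpq : p = (q : ℤ) := by omega
    have hng : ¬ p * p < n := by rw [hpq, hn]; omega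
    have hpv : pv_is_prime p = true := by
      rw [pv_is_prime_iff, hpq]
      refine ⟨by exact_mod_cast hq.two_le, ?_⟩
      rw [Int.toNat_natCast]
      exact hq
    rw [bdLoop, dif_neg hng, if_pos]
    rw [Bool.and_eq_true, hpv]
    refine ⟨beq_iff_eq.mpr ?_, rfl⟩
    rw [hpq, hn]
  | succ k ih =>
    intro p best h2 hle hk
    have hlt : p < (q : ℤ) := by omega
    have hg : p * p < n := by rw [hn]; nlinarith
    rw [bdLoop, dif_pos hg]
    exact ih (p + 1) _ (by omega) (by omega) (by omega)

-- the filtered candidate lists agree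
lemma filter_lists_eq (n : Int) :
    (PySem.List.pyRange 1 n 1).filter (cA n) =
      ((PySem.List.pyRange 2 (tQ n) 1).filter (cB n)).map (fun q => q * q) := by
  apply eq_of_sorted_mem
  · exact (PySem.List.pairwise_lt_pyRange_one 1 n).filter _
  · rw [List.pairwise_map]
    apply List.Pairwise.imp_of_mem ?_ ((PySem.List.pairwise_lt_pyRange_one 2 (tQ n)).filter _)
    intro a b ha hb hab
    have ha2 : 2 ≤ a := ((PySem.List.mem_pyRange_one).mp (List.mem_of_mem_filter ha)).1
    nlinarith
  · intro x
    simp only [List.mem_filter, List.mem_map, PySem.List.mem_pyRange_one]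
    constructor
    · rintro ⟨⟨hx1, hxn⟩, hca⟩
      rw [cA, Bool.and_eq_true, decide_eq_true_eq] at hca
      obtain ⟨hmod, hsimp⟩ := hca
      obtain ⟨P, hP, rfl⟩ := (is_simple_iff x).mp hsimp
      have h2 : (2 : ℤ) ≤ (P : ℤ) := by exact_mod_cast hP.two_le
      refine ⟨(P : ℤ), ⟨⟨h2, ?_⟩, ?_⟩, rfl⟩
      · by_contra hc
        have hc' : tQ n ≤ (P : ℤ) := by omega
        exact absurd (tQ_ge_sq hc') (not_le.mpr hxn)
      · rw [cB, Bool.and_eq_true]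
        constructor
        · rw [pv_is_prime_iff]
          exact ⟨h2, by rw [Int.toNat_natCast]; exact hP⟩
        · simp only [Bool.not_eq_true', beq_eq_false_iff_ne, ne_eq]
          omega
    · rintro ⟨q, ⟨⟨hq2, hqt⟩, hcb⟩, rfl⟩
      rw [cB, Bool.and_eq_true] at hcb
      obtain ⟨hpv, hmod⟩ := hcb
      rcases (pv_is_prime_iff q).mp hpv with ⟨_, hqpr⟩
      have hqlt : q * q < n := tQ_sq_lt n hq2 hqt
      have hmod0 : PySem.Int.mod n (q * q) ≠ 0 := by
        simpa using hmod
      have hpos : (0 : ℤ) < q * q := by positivity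
      refine ⟨⟨by nlinarith, hqlt⟩, ?_⟩
      rw [cA, Bool.and_eq_true, decide_eq_true_eq]
      constructor
      · have := PySem.Int.mod_nonneg n hpos
        omega
      · rw [is_simple_iff]
        refine ⟨q.toNat, hqpr, ?_⟩
        have : ((q.toNat : ℤ)) = q := by omega
        rw [this]

-- ===== VERDICT (by name: the statement is the Claim_ definition above) =====
theorem biggest_divider_spec : Claim_equal_biggest_divider := by
  intro n _
  unfold Spec_biggest_divider
  by_cases h : IsPSq n
  · obtain ⟨P, hP, hPn⟩ := h
    have hA : is_simple n = true := (is_simple_iff n).mpr ⟨P, hP, hPn⟩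
    have h2 : (2 : ℤ) ≤ (P : ℤ) := by exact_mod_cast hP.two_le
    have hB : biggest_divider_alt n = n := by
      unfold biggest_divider_alt
      exact bdLoop_ps n P hP hPn _ 2 0 le_rfl h2 rfl
    simp [biggest_divider, hA, hB]
  · have hA : is_simple n = false := by
      cases hs : is_simple n with
      | false => rfl
      | true => exact absurd ((is_simple_iff n).mp hs) h
    have hB : biggest_divider_alt n =
        ((((PySem.List.pyRange 2 (tQ n) 1).filter (cB n)).getLast?).map (fun q => q * q)).getD 0 :=
      bdLoop_eq n h _ 2 0 le_rfl (tQ_two_le n) rfl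
    rw [biggest_divider_eq n hA, hB, filter_lists_eq n, List.getLast?_map]
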